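-- pv_equiv track=rewrite | github.com/charooanand/table-line-detector | table-line-detector.py | v_count_pix
-- ===== SOURCE A (Python) =====
-- def v_count_pix(image): # input image is b&w and inverted
--
--   v_pix_counts = []
--
--   for x in range(len(image[0])):
--     pix_count = 0
--
--     for y in range(len(image)):
--       pix_count += image[y][x]
--
--     v_pix_counts.append(pix_count)
--
--   return(v_pix_counts)
-- ===== SOURCE B (Python) =====
-- def v_count_pix(image): # single row-major pass maintaining a running per-column sum vector
--     counts = [0] * len(image[0])
--     for row in image:
--         counts = [c + v for c, v in zip(counts, row)]
--     return counts
-- ===== Notes on version B (the rewrite author's own statement) =====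
-- stated objective: alternative
-- what changed: Replaces the column-major nested rescan (for each column, loop over all rows with image[y][x] indexing) by a single row-major pass that maintains a running per-column sum vector updated once per row via zip.
-- outside the precondition, e.g. on v_count_pix([[1, 2], [3]]): A raises IndexError, B returns [4]
import Mathlib
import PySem

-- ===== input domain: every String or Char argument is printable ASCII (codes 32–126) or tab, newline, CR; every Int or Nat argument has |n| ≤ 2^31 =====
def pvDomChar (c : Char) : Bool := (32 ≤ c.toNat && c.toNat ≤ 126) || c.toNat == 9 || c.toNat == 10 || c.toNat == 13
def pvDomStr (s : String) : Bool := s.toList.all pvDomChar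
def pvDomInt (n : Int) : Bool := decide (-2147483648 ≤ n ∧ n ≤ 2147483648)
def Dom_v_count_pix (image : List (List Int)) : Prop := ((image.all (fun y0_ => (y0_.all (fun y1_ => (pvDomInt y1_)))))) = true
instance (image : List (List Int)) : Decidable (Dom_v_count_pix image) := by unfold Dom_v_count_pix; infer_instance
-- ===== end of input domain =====

-- B replaces A's column-major nested rescan by a single row-major pass maintaining a running
-- per-column sum vector (objective: alternative decomposition, same cost).

-- ===== PORT A =====
-- literal port: for x in range(len(image[0])): pix_count = 0; for y in range(len(image)): pix_count += image[y][x]; append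
def v_count_pix (image : List (List Int)) : List Int :=
  (PySem.List.pyRange 0 ((PySem.List.pyGetD image 0 []).length : Int) 1).foldl
    (fun acc x =>
      acc ++ [(PySem.List.pyRange 0 (image.length : Int) 1).foldl
        (fun pix_count y => pix_count + PySem.List.pyGetD (PySem.List.pyGetD image y []) x 0) 0])
    []

-- ===== PORT B =====
-- literal port of Source B: counts = [0]*len(image[0]); for row in image: counts = [c+v for c,v in zip(counts,row)]
def v_count_pix_alt (image : List (List Int)) : List Int :=
  image.foldl (fun counts row => List.zipWith (fun c v => c + v) counts row)
    (List.replicate (PySem.List.pyGetD image 0 []).length 0)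

-- ===== PRECONDITION & SPEC =====
-- A raises IndexError when image is empty (image[0]) or when some row is shorter than row 0
-- (image[y][x]); B's zip would silently truncate on such ragged input, so those inputs are excluded.
def Pre_v_count_pix (image : List (List Int)) : Prop :=
  image ≠ [] ∧ ∀ row ∈ image, (image.headD []).length ≤ row.length
instance (image : List (List Int)) : Decidable (Pre_v_count_pix image) := by
  unfold Pre_v_count_pix; infer_instance

def pvWitness_v_count_pix : List (List Int) := [[1, 2], [3, 4], [5, 6]]

def Spec_v_count_pix (image : List (List Int)) (out : List Int) : Prop := out = v_count_pix_alt image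
instance (image : List (List Int)) (out : List Int) : Decidable (Spec_v_count_pix image out) := by unfold Spec_v_count_pix; infer_instance

-- ===== CLAIM (what is proved, stated in full; the proofs are below) =====
def Claim_equal_v_count_pix : Prop := ∀ (image : List (List Int)), Dom_v_count_pix image → Pre_v_count_pix image → Spec_v_count_pix image (v_count_pix image)

-- ===== LEMMAS AND PROOFS =====

-- append-singleton foldl is map
theorem pv_foldl_append_map {α β : Type} (f : α → β) (l : List α) (acc : List β) :
    l.foldl (fun a x => a ++ [f x]) acc = acc ++ l.map f := by
  induction l generalizing acc with
  | nil => simp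
  | cons x xs ih => simp [List.foldl, ih]

-- characterisation of A as a map of column sums over range
theorem pv_A_char (image : List (List Int)) (h : Pre_v_count_pix image) :
    v_count_pix image =
      (List.range (image.headD []).length).map
        (fun k => image.foldl (fun p row => p + row.getD k 0) 0) := by
  obtain ⟨hne, -⟩ := h
  have h0 : PySem.List.pyGetD image 0 [] = image.headD [] := by
    cases image with
    | nil => exact absurd rfl hne
    | cons r rs => simp [PySem.List.pyGetD_zero_cons]
  unfold v_count_pix
  rw [h0, pv_foldl_append_map]
  have hinner : ∀ x : Int,
      (PySem.List.pyRange 0 (image.length : Int) 1).foldl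
        (fun pix_count y => pix_count + PySem.List.pyGetD (PySem.List.pyGetD image y []) x 0) 0 =
      image.foldl (fun p row => p + PySem.List.pyGetD row x 0) 0 := fun x =>
    PySem.List.foldl_pyRange_zero_pyGetD image [] (fun p row => p + PySem.List.pyGetD row x 0) 0
  simp only [hinner, List.nil_append]
  rw [PySem.List.pyRange_zero_nat, List.map_map]
  apply List.map_congr_left
  intro k _
  simp only [Function.comp]
  simp [PySem.List.pyGetD_natCast]

theorem pv_getD_zipWith (xs ys : List Int) (k : Nat) (hk : k < xs.length)
    (hlen : xs.length ≤ ys.length) :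
    (List.zipWith (fun c v => c + v) xs ys).getD k 0 = xs.getD k 0 + ys.getD k 0 := by
  have h1 : k < ys.length := lt_of_lt_of_le hk hlen
  have h2 : k < (List.zipWith (fun c v => c + v) xs ys).length := by
    simp [List.length_zipWith]; omega
  rw [List.getD_eq_getElem _ _ h2, List.getD_eq_getElem _ _ hk, List.getD_eq_getElem _ _ h1]
  simp

-- invariant: folding zipWith-add rows over counts computes per-column sums started from counts
theorem pv_B_inv (rows : List (List Int)) (counts : List Int)
    (h : ∀ row ∈ rows, counts.length ≤ row.length) :
    rows.foldl (fun c row => List.zipWith (fun a b => a + b) c row) counts =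
      (List.range counts.length).map
        (fun k => rows.foldl (fun p row => p + row.getD k 0) (counts.getD k 0)) := by
  induction rows generalizing counts with
  | nil =>
      simp only [List.foldl]
      apply List.ext_getElem (by simp)
      intro i h1 h2
      simp [List.getD, List.getElem?_eq_getElem h1]
  | cons r rs ih =>
      simp only [List.foldl]
      have hr : counts.length ≤ r.length := h r (List.mem_cons_self ..)
      have hlen : (List.zipWith (fun a b => a + b) counts r).length = counts.length := by
        simp [List.length_zipWith]; omega
      rw [ih _ (by intro row hrow; rw [hlen]; exact h row (List.mem_cons_of_mem _ hrow))]
      rw [hlen]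
      apply List.map_congr_left
      intro k hk
      rw [List.mem_range] at hk
      rw [pv_getD_zipWith counts r k hk hr]

theorem pv_B_char (image : List (List Int)) (h : Pre_v_count_pix image) :
    v_count_pix_alt image =
      (List.range (image.headD []).length).map
        (fun k => image.foldl (fun p row => p + row.getD k 0) 0) := by
  obtain ⟨hne, hrows⟩ := h
  have h0 : PySem.List.pyGetD image 0 [] = image.headD [] := by
    cases image with
    | nil => exact absurd rfl hne
    | cons r rs => simp [PySem.List.pyGetD_zero_cons]
  unfold v_count_pix_alt
  rw [h0]
  rw [pv_B_inv image (List.replicate (image.headD []).length 0)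
      (by intro row hrow; simpa using hrows row hrow)]
  simp

-- ===== VERDICT (by name: the statement is the Claim_ definition above) =====
theorem v_count_pix_spec : Claim_equal_v_count_pix := by
  intro image _ hpre
  unfold Spec_v_count_pix
  rw [pv_A_char image hpre, pv_B_char image hpre]
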